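-- pv_equiv track=rewrite | github.com/DiegoRS2/Prova_inteligencia_artificial | gps.py | marcar_caminho_encontrado
-- ===== SOURCE A (Python) =====
-- import copy
--
-- def marcar_caminho_encontrado(matriz, caminho):
--     if caminho is None:
--         return
--
--     matriz_temp = copy.deepcopy(matriz)
--
--     caminho_set = set(caminho)
--     for i in range(len(matriz_temp)):
--         for j in range(len(matriz_temp[0])):
--             if (i, j) in caminho_set:
--                 matriz_temp[i][j] = 'X'
--
--     return matriz_temp
-- ===== SOURCE B (Python) =====
-- import copy
--
-- def marcar_caminho_encontrado(matriz, caminho):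
--     if caminho is None:
--         return
--
--     novo = copy.deepcopy(matriz)
--     n = len(novo)
--     ncols = len(novo[0]) if novo else 0
--     for (i, j) in caminho:
--         if 0 <= i < n and 0 <= j < ncols:
--             novo[i][j] = 'X'
--     return novo
-- ===== Notes on version B (the rewrite author's own statement) =====
-- stated objective: simpler
-- what changed: Instead of scanning every matrix cell and testing membership in set(caminho), B iterates directly over the path coordinates and marks each in-bounds cell of the copied matrix.
import Mathlib
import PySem

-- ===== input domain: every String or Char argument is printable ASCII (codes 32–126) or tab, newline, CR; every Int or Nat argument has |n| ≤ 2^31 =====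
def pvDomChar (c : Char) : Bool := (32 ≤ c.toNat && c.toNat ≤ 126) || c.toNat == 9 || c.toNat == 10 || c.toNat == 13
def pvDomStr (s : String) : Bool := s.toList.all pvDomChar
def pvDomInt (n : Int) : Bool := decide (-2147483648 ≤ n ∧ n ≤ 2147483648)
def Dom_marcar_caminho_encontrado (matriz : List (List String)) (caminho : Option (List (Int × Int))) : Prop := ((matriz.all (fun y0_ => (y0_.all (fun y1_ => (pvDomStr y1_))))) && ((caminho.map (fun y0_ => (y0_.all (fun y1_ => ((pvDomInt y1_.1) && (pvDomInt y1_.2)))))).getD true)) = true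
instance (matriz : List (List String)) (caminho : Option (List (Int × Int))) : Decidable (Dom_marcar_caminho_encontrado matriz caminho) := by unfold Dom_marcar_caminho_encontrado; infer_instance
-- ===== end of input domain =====

-- B marks cells by iterating over the path coordinates instead of scanning every matrix cell (simpler decomposition, same result).


-- ===== PORT A =====
-- Python A: deepcopy, build set(caminho), scan every (i,j) with i < len(matriz), j < len(matriz[0]),
-- mark 'X' when (i,j) is in the set.  The in-place assignment matriz_temp[i][j] = 'X' is modelled by
-- List.set (a no-op out of range, which is exactly the region where the Python raises, excluded by Pre_).
def marcar_caminho_encontrado (matriz : List (List String)) (caminho : Option (List (Int × Int))) : Option (List (List String)) :=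
  match caminho with
  | none => none
  | some l =>
    let matriz_temp := matriz
    let caminho_set : PySem.Set (Int × Int) := PySem.Set.ofList l
    some ((List.range matriz_temp.length).foldl (fun acc (i : Nat) =>
      (List.range (matriz_temp.headD []).length).foldl (fun acc (j : Nat) =>
        if ((i : Int), (j : Int)) ∈ caminho_set then
          acc.set i ((acc.getD i []).set j "X")
        else acc) acc) matriz_temp)

-- ===== PORT B =====
-- B: copy, then one pass over the path, marking each in-bounds cell.
def marcar_caminho_encontrado_alt (matriz : List (List String)) (caminho : Option (List (Int × Int))) : Option (List (List String)) :=
  match caminho with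
  | none => none
  | some l =>
    let n : Int := matriz.length
    let ncols : Int := (matriz.headD []).length
    some (l.foldl (fun acc p =>
      if 0 ≤ p.1 ∧ p.1 < n ∧ 0 ≤ p.2 ∧ p.2 < ncols then
        acc.set p.1.toNat ((acc.getD p.1.toNat []).set p.2.toNat "X")
      else acc) matriz)

-- ===== PRECONDITION & SPEC =====
-- Pre_ excludes exactly the inputs on which the Python raises IndexError (both A and B do): a path
-- coordinate inside the scanned rectangle (rows × len(row 0)) whose column exceeds its own (ragged) row.
def Pre_marcar_caminho_encontrado (matriz : List (List String)) (caminho : Option (List (Int × Int))) : Prop :=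
  ∀ p ∈ caminho.getD [],
    (0 ≤ p.1 ∧ p.1 < (matriz.length : Int) ∧ 0 ≤ p.2 ∧ p.2 < ((matriz.headD []).length : Int)) →
      p.2.toNat < (matriz.getD p.1.toNat []).length
instance (matriz : List (List String)) (caminho : Option (List (Int × Int))) : Decidable (Pre_marcar_caminho_encontrado matriz caminho) := by unfold Pre_marcar_caminho_encontrado; infer_instance
def pvWitness_marcar_caminho_encontrado : List (List String) × (Option (List (Int × Int))) :=
  ([["a", "b"], ["c", "d"]], some [(0, 1), (1, 0), (5, 0), (-1, 2)])
def Spec_marcar_caminho_encontrado (matriz : List (List String)) (caminho : Option (List (Int × Int))) (out : Option (List (List String))) : Prop := out = marcar_caminho_encontrado_alt matriz caminho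
instance (matriz : List (List String)) (caminho : Option (List (Int × Int))) (out : Option (List (List String))) : Decidable (Spec_marcar_caminho_encontrado matriz caminho out) := by unfold Spec_marcar_caminho_encontrado; infer_instance

-- ===== CLAIM (what is proved, stated in full; the proofs are below) =====
def Claim_equal_marcar_caminho_encontrado : Prop := ∀ (matriz : List (List String)) (caminho : Option (List (Int × Int))), Dom_marcar_caminho_encontrado matriz caminho → Pre_marcar_caminho_encontrado matriz caminho → Spec_marcar_caminho_encontrado matriz caminho (marcar_caminho_encontrado matriz caminho)

-- ===== LEMMAS AND PROOFS =====

-- Pointwise description of a marked matrix.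
def pvMark (m : List (List String)) (P : Nat → Nat → Bool) : List (List String) :=
  m.mapIdx fun i row => row.mapIdx fun j x => if P i j then "X" else x

theorem pvMark_false (m : List (List String)) : pvMark m (fun _ _ => false) = m := by
  have h : ∀ {α : Type} (l : List α), List.mapIdx (fun _ x => x) l = l := by
    intro α l
    induction l with
    | nil => simp
    | cons a t ih => simp [List.mapIdx_cons, ih]
  simp [pvMark, h]

theorem pvUpd_mark (m : List (List String)) (P : Nat → Nat → Bool) (i j : Nat) :
    (pvMark m P).set i (((pvMark m P).getD i []).set j "X")
      = pvMark m (fun i' j' => P i' j' || (i' == i && j' == j)) := by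
  unfold pvMark
  apply List.ext_getElem
  · simp
  · intro n h1 h2
    simp only [List.getElem_set, List.getElem_mapIdx]
    by_cases hin : i = n
    · subst hin
      rw [if_pos rfl]
      have hlen : i < m.length := by simpa using h2
      rw [List.getD_eq_getElem _ _ (by simpa using hlen)]
      simp only [List.getElem_mapIdx]
      apply List.ext_getElem
      · simp
      · intro k hk1 hk2
        simp only [List.getElem_set, List.getElem_mapIdx]
        by_cases hjk : j = k
        · subst hjk
          simp
        · rw [if_neg hjk]
          have : (k == j) = false := beq_eq_false_iff_ne.mpr (fun h => hjk h.symm)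
          simp [this]
    · rw [if_neg hin]
      have : (n == i) = false := beq_eq_false_iff_ne.mpr (fun h => hin h.symm)
      simp [this]

theorem pvMark_congr (m : List (List String)) (P Q : Nat → Nat → Bool)
    (h : ∀ i, i < m.length → ∀ j, P i j = Q i j) : pvMark m P = pvMark m Q := by
  unfold pvMark
  apply List.ext_getElem
  · simp
  · intro n h1 h2
    simp only [List.getElem_mapIdx]
    have hfun : (fun j x => if P n j then "X" else x) = (fun j (x : String) => if Q n j then "X" else x) := by
      funext j x
      rw [h n (by simpa using h1) j]
    rw [hfun]

theorem pvFoldB (m : List (List String)) (nI ncolsI : Int) (ps : List (Int × Int)) (P : Nat → Nat → Bool) :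
    ps.foldl (fun acc p =>
        if 0 ≤ p.1 ∧ p.1 < nI ∧ 0 ≤ p.2 ∧ p.2 < ncolsI then
          acc.set p.1.toNat ((acc.getD p.1.toNat []).set p.2.toNat "X")
        else acc) (pvMark m P)
    = pvMark m (fun i' j' => P i' j' ||
        ps.any (fun p => decide (0 ≤ p.1 ∧ p.1 < nI ∧ 0 ≤ p.2 ∧ p.2 < ncolsI)
          && (p.1 == (i' : Int)) && (p.2 == (j' : Int)))) := by
  induction ps generalizing P with
  | nil => simp
  | cons p ps ih =>
    rw [List.foldl_cons]
    by_cases hc : 0 ≤ p.1 ∧ p.1 < nI ∧ 0 ≤ p.2 ∧ p.2 < ncolsI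
    · rw [if_pos hc, pvUpd_mark, ih]
      apply congrArg (pvMark m)
      funext i' j'
      obtain ⟨hp1, hp2, hp3, hp4⟩ := hc
      have hd : decide (0 ≤ p.1 ∧ p.1 < nI ∧ 0 ≤ p.2 ∧ p.2 < ncolsI) = true := by
        simp [hp1, hp2, hp3, hp4]
      have hb : ((i' == p.1.toNat) && (j' == p.2.toNat))
          = ((p.1 == (i' : Int)) && (p.2 == (j' : Int))) := by
        rw [Bool.eq_iff_iff]
        simp only [Bool.and_eq_true, beq_iff_eq]
        omega
      rw [List.any_cons, hd]
      simp only [Bool.true_and]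
      rw [← hb, Bool.or_assoc]
    · rw [if_neg hc, ih]
      apply congrArg (pvMark m)
      funext i' j'
      have hd : decide (0 ≤ p.1 ∧ p.1 < nI ∧ 0 ≤ p.2 ∧ p.2 < ncolsI) = false := by
        simpa using hc
      rw [List.any_cons, hd]
      simp only [Bool.false_and, Bool.false_or]

theorem pvFoldA_inner (m : List (List String)) (sl : List (Int × Int)) (js : List Nat) (i0 : Nat) (P : Nat → Nat → Bool) :
    js.foldl (fun acc (j : Nat) =>
        if ((i0 : Int), (j : Int)) ∈ sl then acc.set i0 ((acc.getD i0 []).set j "X") else acc) (pvMark m P)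
    = pvMark m (fun i' j' => P i' j' ||
        ((i' == i0) && js.any (fun j0 => (j' == j0) && decide (((i0 : Int), (j0 : Int)) ∈ sl)))) := by
  induction js generalizing P with
  | nil => simp
  | cons j js ih =>
    rw [List.foldl_cons]
    by_cases hmem : ((i0 : Int), (j : Int)) ∈ sl
    · rw [if_pos hmem, pvUpd_mark, ih]
      apply congrArg (pvMark m)
      funext i' j'
      have hd : decide (((i0 : Int), (j : Int)) ∈ sl) = true := by simpa using hmem
      simp only [List.any_cons, hd, Bool.and_true]
      cases P i' j' <;> cases (i' == i0) <;> cases (j' == j) <;> simp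
    · rw [if_neg hmem, ih]
      apply congrArg (pvMark m)
      funext i' j'
      have hd : decide (((i0 : Int), (j : Int)) ∈ sl) = false := by simpa using hmem
      simp [List.any_cons, hd]

theorem pvFoldA_outer (m : List (List String)) (sl : List (Int × Int)) (ncols : Nat) (is : List Nat) (P : Nat → Nat → Bool) :
    is.foldl (fun acc (i : Nat) =>
        (List.range ncols).foldl (fun acc2 (j : Nat) =>
          if ((i : Int), (j : Int)) ∈ sl then acc2.set i ((acc2.getD i []).set j "X") else acc2) acc) (pvMark m P)
    = pvMark m (fun i' j' => P i' j' ||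
        is.any (fun i0 => (i' == i0) && (List.range ncols).any (fun j0 => (j' == j0) && decide (((i0 : Int), (j0 : Int)) ∈ sl)))) := by
  induction is generalizing P with
  | nil => simp
  | cons i0 is ih =>
    rw [List.foldl_cons, pvFoldA_inner, ih]
    apply congrArg (pvMark m)
    funext i' j'
    simp [List.any_cons, Bool.or_assoc]

-- Corollaries starting the folds from the raw matrix.
theorem pvFoldA_top (m : List (List String)) (sl : List (Int × Int)) (ncols : Nat) (is : List Nat) :
    is.foldl (fun acc (i : Nat) =>
        (List.range ncols).foldl (fun acc2 (j : Nat) =>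
          if ((i : Int), (j : Int)) ∈ sl then acc2.set i ((acc2.getD i []).set j "X") else acc2) acc) m
    = pvMark m (fun i' j' =>
        is.any (fun i0 => (i' == i0) && (List.range ncols).any (fun j0 => (j' == j0) && decide (((i0 : Int), (j0 : Int)) ∈ sl)))) := by
  conv_lhs => rw [← pvMark_false m]
  rw [pvFoldA_outer]
  simp only [Bool.false_or]

theorem pvFoldB_top (m : List (List String)) (nI ncolsI : Int) (ps : List (Int × Int)) :
    ps.foldl (fun acc p =>
        if 0 ≤ p.1 ∧ p.1 < nI ∧ 0 ≤ p.2 ∧ p.2 < ncolsI then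
          acc.set p.1.toNat ((acc.getD p.1.toNat []).set p.2.toNat "X")
        else acc) m
    = pvMark m (fun i' j' =>
        ps.any (fun p => decide (0 ≤ p.1 ∧ p.1 < nI ∧ 0 ≤ p.2 ∧ p.2 < ncolsI)
          && (p.1 == (i' : Int)) && (p.2 == (j' : Int)))) := by
  conv_lhs => rw [← pvMark_false m]
  rw [pvFoldB]
  simp only [Bool.false_or]

-- ===== VERDICT (by name: the statement is the Claim_ definition above) =====
theorem marcar_caminho_encontrado_spec : Claim_equal_marcar_caminho_encontrado := by
  intro matriz caminho _hdom _hpre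
  unfold Spec_marcar_caminho_encontrado marcar_caminho_encontrado marcar_caminho_encontrado_alt
  cases caminho with
  | none => rfl
  | some l =>
    simp only
    rw [pvFoldA_top, pvFoldB_top]
    congr 1
    apply pvMark_congr
    intro i hi j
    rw [Bool.eq_iff_iff]
    simp only [List.any_eq_true, List.mem_range, beq_iff_eq, decide_eq_true_eq,
      Bool.and_eq_true, PySem.Set.mem_ofList]
    constructor
    · rintro ⟨i0, hi0, hii, j0, hj0, hjj, hmem⟩
      subst hii; subst hjj
      exact ⟨((i : Int), (j : Int)), hmem, ⟨⟨by omega, by omega, by omega, by omega⟩, rfl⟩, rfl⟩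
    · rintro ⟨p, hp, ⟨⟨h1, h2, h3, h4⟩, e1⟩, e2⟩
      refine ⟨i, hi, rfl, j, by omega, rfl, ?_⟩
      have hpe : p = ((i : Int), (j : Int)) := Prod.ext (by omega) (by omega)
      rwa [hpe] at hp
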